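-- pv_equiv track=rewrite | github.com/Benja182/crearVector | proyectoA/funciones.py | buscar_criterios
-- ===== SOURCE A (Python) =====
-- def buscar_criterios(palabra):
--     s_letra = False
--     t_letra = False
--     mayus = False
--     for letra in palabra:
--         if letra.lower() == 's':
--             s_letra = True
--
--         elif letra.lower() == 't':
--             t_letra = True
--
--         if palabra[0].isupper():
--             mayus = True
--
--     if s_letra and t_letra and mayus:
--         return True
--     return False
-- ===== SOURCE B (Python) =====
-- def buscar_criterios(palabra):
--     # Recursively walk the word with a shrinking set of still-needed letters,
--     # stopping early once nothing is needed.
--     def falta(i, need):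
--         if not need:
--             return True
--         if i == len(palabra):
--             return False
--         return falta(i + 1, need - {palabra[i].lower()})
--     return palabra[:1].isupper() and falta(0, frozenset('st'))
-- ===== Notes on version B (the rewrite author's own statement) =====
-- stated objective: alternative
-- what changed: Replaces A's flag-accumulating loop (which re-tests the first letter on every iteration) by a recursive search carrying a shrinking set of still-needed letters that returns as soon as the set is empty, guarded by an uppercase test on the one-character prefix slice.
import Mathlib
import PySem

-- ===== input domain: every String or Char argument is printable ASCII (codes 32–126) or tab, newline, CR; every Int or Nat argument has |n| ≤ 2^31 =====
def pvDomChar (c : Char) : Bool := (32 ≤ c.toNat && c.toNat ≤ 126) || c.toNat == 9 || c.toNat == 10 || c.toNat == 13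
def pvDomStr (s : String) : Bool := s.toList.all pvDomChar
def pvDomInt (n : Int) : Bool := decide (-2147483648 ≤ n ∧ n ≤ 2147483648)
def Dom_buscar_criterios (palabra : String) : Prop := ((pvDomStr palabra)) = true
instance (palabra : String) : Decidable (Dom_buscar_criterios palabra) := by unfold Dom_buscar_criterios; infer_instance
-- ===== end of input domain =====

-- B replaces A's flag-accumulating loop by an early-exit recursion over the word that
-- carries the set of still-needed letters; objective: alternative.

-- ===== PORT A =====
-- the loop keeps three flags; the `elif` means a letter equal to 's' (lowered) is not
-- tested for 't'; `palabra[0].isupper()` is re-tested on every iteration but only runs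
-- when the string is nonempty, so the fold reads the (fixed) head of the captured list.
def buscar_criterios (palabra : String) : Bool :=
  let cs := palabra.toList
  let st := cs.foldl (fun (acc : Bool × Bool × Bool) letra =>
    let s_letra := if PySem.Chars.lowerChar letra == 's' then true else acc.1
    let t_letra := if PySem.Chars.lowerChar letra == 's' then acc.2.1
                   else if PySem.Chars.lowerChar letra == 't' then true else acc.2.1
    let mayus := if PySem.Chars.isupper (cs.headD letra) then true else acc.2.2
    (s_letra, t_letra, mayus)) (false, false, false)
  if st.1 && st.2.1 && st.2.2 then true else false

-- ===== PORT B =====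
-- hand port of Python str.isupper (exact on ASCII, the stated domain): at least one
-- cased character and no lowercase character
def pyStrIsupper (cs : List Char) : Bool :=
  cs.any (fun c => PySem.Chars.isupper c || PySem.Chars.islower c) && cs.all (fun c => !PySem.Chars.islower c)

-- `falta i need`: the remaining characters, with the set of still-needed letters
-- (the frozenset is a PySem.Set-style distinct list; `need - {c}` is its filter)
def pvFalta : List Char → List Char → Bool
  | _, [] => true
  | [], _ :: _ => false
  | c :: rest, need => pvFalta rest (need.filter (fun x => x ≠ PySem.Chars.lowerChar c))

def buscar_criterios_alt (palabra : String) : Bool :=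
  pyStrIsupper (PySem.Str.slice palabra none (some 1)).toList
    && pvFalta palabra.toList ['s', 't']

-- ===== PRECONDITION & SPEC =====
def Spec_buscar_criterios (palabra : String) (out : Bool) : Prop := out = buscar_criterios_alt palabra
instance (palabra : String) (out : Bool) : Decidable (Spec_buscar_criterios palabra out) := by unfold Spec_buscar_criterios; infer_instance

-- ===== CLAIM (what is proved, stated in full; the proofs are below) =====
def Claim_equal_buscar_criterios : Prop := ∀ (palabra : String), Dom_buscar_criterios palabra → Spec_buscar_criterios palabra (buscar_criterios palabra)

-- ===== LEMMAS AND PROOFS =====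

-- A's loop computes: s-flag = some letter lowers to 's', t-flag = some letter lowers to 't'
-- (the `elif` is harmless since 's' ≠ 't'), mayus = the list is nonempty and `c` is uppercase.
theorem buscar_flags (c : Char) (cs' : List Char) (l : List Char) (a b m : Bool) :
    l.foldl (fun (acc : Bool × Bool × Bool) letra =>
        (if PySem.Chars.lowerChar letra == 's' then true else acc.1,
         if PySem.Chars.lowerChar letra == 's' then acc.2.1
           else if PySem.Chars.lowerChar letra == 't' then true else acc.2.1,
         if PySem.Chars.isupper ((c :: cs').headD letra) then true else acc.2.2)) (a, b, m)
    = (a || l.any (fun x => PySem.Chars.lowerChar x == 's'),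
       b || l.any (fun x => PySem.Chars.lowerChar x == 't'),
       m || (!l.isEmpty && PySem.Chars.isupper c)) := by
  induction l generalizing a b m with
  | nil => simp
  | cons x xs ih =>
    rw [List.foldl_cons, ih]
    simp only [List.any_cons, List.isEmpty_cons, Bool.not_false, Bool.true_and,
      List.headD_cons, Prod.mk.injEq]
    refine ⟨?_, ?_, ?_⟩
    · by_cases hs : PySem.Chars.lowerChar x = 's'
      · simp [hs]
      · simp [beq_eq_false_iff_ne.mpr hs]
    · by_cases hs : PySem.Chars.lowerChar x = 's'
      · simp [hs]
      · by_cases ht : PySem.Chars.lowerChar x = 't'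
        · simp [ht]
        · simp [beq_eq_false_iff_ne.mpr hs, beq_eq_false_iff_ne.mpr ht]
    · cases hu : PySem.Chars.isupper c <;> simp

theorem isupper_of_islower (c : Char) :
    PySem.Chars.islower c = true → PySem.Chars.isupper c = false := by
  simp [PySem.Chars.islower, PySem.Chars.isupper, Char.le_def, UInt32.le_iff_toNat_le]
  intro h1 h2
  omega

-- B's recursion succeeds exactly when every still-needed letter occurs (lowered) in the rest
theorem pvFalta_eq (cs need : List Char) :
    pvFalta cs need = need.all (fun ch => cs.any (fun x => PySem.Chars.lowerChar x == ch)) := by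
  induction cs generalizing need with
  | nil =>
    cases need with
    | nil => simp [pvFalta]
    | cons n ns => simp [pvFalta]
  | cons c rest ih =>
    cases need with
    | nil => simp [pvFalta]
    | cons n ns =>
      have hstep : pvFalta (c :: rest) (n :: ns)
          = pvFalta rest ((n :: ns).filter (fun x => x ≠ PySem.Chars.lowerChar c)) := rfl
      rw [hstep, ih, Bool.eq_iff_iff]
      simp only [List.all_eq_true, List.mem_filter, List.any_cons, List.any_eq_true,
        decide_eq_true_eq, Bool.or_eq_true, beq_iff_eq]
      constructor
      · intro h ch hch
        by_cases he : ch = PySem.Chars.lowerChar c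
        · exact Or.inl he.symm
        · exact Or.inr (h ch ⟨hch, by simpa using he⟩)
      · rintro h ch ⟨hch, hne⟩
        rcases h ch hch with h1 | h2
        · exact absurd h1.symm (by simpa using hne)
        · exact h2

-- ===== VERDICT (by name: the statement is the Claim_ definition above) =====
theorem buscar_criterios_spec : Claim_equal_buscar_criterios := by
  intro palabra _
  unfold Spec_buscar_criterios buscar_criterios buscar_criterios_alt
  cases hcs : palabra.toList with
  | nil =>
    simp [hcs, pyStrIsupper, PySem.Str.toList_slice, PySem.Chars.slice_eq_listSlice,
      PySem.List.slice_to (xs := ([] : List Char)) (b := 1) (by norm_num)]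
  | cons c rest =>
    have hsl : (PySem.Str.slice palabra none (some 1)).toList = [c] := by
      rw [PySem.Str.toList_slice, PySem.Chars.slice_eq_listSlice,
        PySem.List.slice_to _ (by norm_num : (0:Int) ≤ 1), hcs]
      rfl
    simp only [buscar_flags c rest (c :: rest) false false false]
    rw [pvFalta_eq]
    simp only [hsl, pyStrIsupper, List.all_cons, List.all_nil, List.any_cons,
      List.any_nil, List.isEmpty_cons, Bool.not_false, Bool.true_and, Bool.and_true,
      Bool.false_or, Bool.or_false]
    cases hl : PySem.Chars.islower c
    · cases PySem.Chars.isupper c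
      · simp
      · rw [Bool.eq_iff_iff]
        simp [List.any_eq_true, beq_iff_eq]
    · simp [isupper_of_islower c hl]
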